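-- pv_equiv track=rewrite | github.com/jahaselden/CS_320_algos_course_work | HW2/main.py | new_words
-- ===== SOURCE A (Python) =====
-- import math  # optional and you can delete this line if not useful
--
-- def check_incorrect_input(words, wordlist):
--     if words is None or wordlist is None:
--         return True
--     elif isinstance(words, tuple) and isinstance(wordlist, tuple):
--         return False
--     else:
--         return True
--
-- def search_word_in_wordlist(key, tuple, low, high):
--     mid = math.floor((low + high) / 2)
--     if low > high:
--         return True
--     if key.lower() == tuple[mid].lower():  # word is in wordlist, don't add to new tuple
--         return False
--     elif key.lower() < tuple[mid].lower():
--         return search_word_in_wordlist(key, tuple, low, mid - 1)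
--     else:
--         return search_word_in_wordlist(key, tuple, mid + 1, high)
--
-- def new_words(words, wordlist):
--
--     list_of_tuples = []
--
--     if check_incorrect_input(words, wordlist):
--         return None
--     else:
--         for w in words:
--             if search_word_in_wordlist(w, wordlist, 0, len(wordlist) - 1):
--                 list_of_tuples.append(w)
--         return tuple(list_of_tuples)
-- ===== SOURCE B (Python) =====
-- def new_words(words, wordlist):
--     if words is None or wordlist is None:
--         return None
--     if not (isinstance(words, tuple) and isinstance(wordlist, tuple)):
--         return None
--     # lowercase the wordlist once; the search walks actual list slices instead of
--     # index pairs: same midpoints and comparison sequence as A's binary search.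
--     lowered = [x.lower() for x in wordlist]
--     out = []
--     for w in words:
--         kl = w.lower()
--         seg = lowered
--         while seg:
--             m = (len(seg) - 1) // 2
--             x = seg[m]
--             if kl == x:
--                 break
--             seg = seg[:m] if kl < x else seg[m + 1:]
--         else:
--             out.append(w)
--     return tuple(out)
-- ===== Notes on version B (the rewrite author's own statement) =====
-- stated objective: alternative
-- what changed: B lowercases the wordlist once up front and replaces A's index-pair recursive binary search with an iterative loop that narrows an actual list slice (seg = seg[:m] / seg[m+1:], m = (len(seg)-1)//2), which visits the same midpoints and comparisons as A, so results match even on unsorted wordlists.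
import Mathlib
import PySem

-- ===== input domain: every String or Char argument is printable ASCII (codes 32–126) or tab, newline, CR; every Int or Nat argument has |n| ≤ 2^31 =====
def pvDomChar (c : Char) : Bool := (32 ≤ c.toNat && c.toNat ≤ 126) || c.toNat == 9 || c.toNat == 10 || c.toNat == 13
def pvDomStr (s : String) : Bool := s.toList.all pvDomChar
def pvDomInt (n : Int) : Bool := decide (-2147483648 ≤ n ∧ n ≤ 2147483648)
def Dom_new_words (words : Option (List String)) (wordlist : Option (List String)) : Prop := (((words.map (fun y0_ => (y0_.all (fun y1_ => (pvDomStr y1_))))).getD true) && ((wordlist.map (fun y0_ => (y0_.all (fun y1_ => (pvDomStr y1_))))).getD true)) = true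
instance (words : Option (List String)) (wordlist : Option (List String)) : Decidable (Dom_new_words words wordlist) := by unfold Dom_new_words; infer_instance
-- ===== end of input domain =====

-- B lowercases the wordlist once and narrows an actual list slice instead of recursing
-- on index pairs; same midpoints and comparison sequence, so the return values are equal.

-- termination facts for the two searches (cited by name in decreasing_by to keep the
-- definition bodies small)
theorem search_dec_left (low high : Int) (h : ¬ low > high) :
    (PySem.Int.floordiv (low + high) 2 - 1 - low + 1).toNat < (high - low + 1).toNat := by
  have := PySem.Int.floordiv_two_mid_bounds (lo := low) (hi := high) (le_of_not_gt h); omega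

theorem search_dec_right (low high : Int) (h : ¬ low > high) :
    (high - (PySem.Int.floordiv (low + high) 2 + 1) + 1).toNat < (high - low + 1).toNat := by
  have := PySem.Int.floordiv_two_mid_bounds (lo := low) (hi := high) (le_of_not_gt h); omega

theorem pv_mid_lt (seg : List String) (h : 0 < seg.length) : (seg.length - 1) / 2 < seg.length := by
  have := Nat.div_le_self (seg.length - 1) 2; omega

theorem pv_dec_take (seg : List String) (h : 0 < seg.length) :
    (seg.take ((seg.length - 1) / 2)).length < seg.length := by
  have := pv_mid_lt seg h; simp; omega

theorem pv_dec_drop (seg : List String) (h : 0 < seg.length) :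
    (seg.drop ((seg.length - 1) / 2 + 1)).length < seg.length := by
  simp; omega

-- ===== PORT A =====
def check_incorrect_input (words : Option (List String)) (wordlist : Option (List String)) : Bool :=
  match words, wordlist with
  | none, _ => true
  | _, none => true
  | some _, some _ => false   -- both non-None tuples

def search_word_in_wordlist (key : String) (t : List String) (low high : Int) : Bool :=
  -- mid = math.floor((low+high)/2); ints in, so this is floor division (inlined at each use)
  if low > high then true
  else
    match PySem.List.pyGet? t (PySem.Int.floordiv (low + high) 2) with
    | none => true   -- tuple[mid] IndexError (unreachable from new_words)
    | some x =>
      if PySem.Str.lower key = PySem.Str.lower x then false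
      else if PySem.Str.lower key < PySem.Str.lower x then
        search_word_in_wordlist key t low (PySem.Int.floordiv (low + high) 2 - 1)
      else
        search_word_in_wordlist key t (PySem.Int.floordiv (low + high) 2 + 1) high
termination_by (high - low + 1).toNat
decreasing_by
  · exact search_dec_left low high (by assumption)
  · exact search_dec_right low high (by assumption)

def new_words (words : Option (List String)) (wordlist : Option (List String)) : Option (List String) :=
  if check_incorrect_input words wordlist then none
  else
    match words, wordlist with
    | some ws, some wl =>
      some (ws.foldl (fun acc w =>
        if search_word_in_wordlist w wl 0 ((wl.length : Int) - 1) then acc ++ [w] else acc) [])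
    | _, _ => none   -- unreachable: check_incorrect_input is true otherwise

-- ===== PORT B =====
-- Source B's while loop reassigning `seg` to a slice, written as the structural recursion on seg;
-- seg[m] is exact: m = (len-1)/2 < len on a nonempty seg, proved inline.
def pv_absent (kl : String) (seg : List String) : Bool :=
  if h : 0 < seg.length then
    let m := (seg.length - 1) / 2
    let x := seg[m]'(pv_mid_lt seg h)
    if kl = x then false
    else if kl < x then pv_absent kl (seg.take m)
    else pv_absent kl (seg.drop (m + 1))
  else true
termination_by seg.length
decreasing_by
  · exact pv_dec_take seg h
  · exact pv_dec_drop seg h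

def new_words_alt (words : Option (List String)) (wordlist : Option (List String)) : Option (List String) :=
  match words, wordlist with
  | none, _ => none
  | _, none => none
  | some ws, some wl =>
    let lowered := wl.map PySem.Str.lower
    some (ws.filter (fun w => pv_absent (PySem.Str.lower w) lowered))

-- ===== PRECONDITION & SPEC =====
def Spec_new_words (words : Option (List String)) (wordlist : Option (List String)) (out : Option (List String)) : Prop := out = new_words_alt words wordlist
instance (words : Option (List String)) (wordlist : Option (List String)) (out : Option (List String)) : Decidable (Spec_new_words words wordlist out) := by unfold Spec_new_words; infer_instance

-- ===== CLAIM (what is proved, stated in full; the proofs are below) =====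
def Claim_equal_new_words : Prop := ∀ (words : Option (List String)) (wordlist : Option (List String)), Dom_new_words words wordlist → Spec_new_words words wordlist (new_words words wordlist)

-- ===== LEMMAS AND PROOFS =====

-- A's index-pair search over t equals B's slice search over the pre-lowered list:
-- the slice [low..high] of (t.map lower) is (drop low).take (high+1-low).
-- pv_absent on a nonempty seg, with the midpoint element given through getElem?
theorem pv_absent_pos (kl : String) (seg : List String) (x : String) (h : 0 < seg.length)
    (hx : seg[(seg.length - 1) / 2]? = some x) :
    pv_absent kl seg
      = if kl = x then false
        else if kl < x then pv_absent kl (seg.take ((seg.length - 1) / 2))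
        else pv_absent kl (seg.drop ((seg.length - 1) / 2 + 1)) := by
  rw [pv_absent, dif_pos h]
  have hlt : (seg.length - 1) / 2 < seg.length := by
    have := Nat.div_le_self (seg.length - 1) 2; omega
  have hv : seg[(seg.length - 1) / 2]'hlt = x := by
    have := List.getElem?_eq_getElem hlt
    rw [hx] at this; exact (Option.some.injEq _ _).mp this.symm
  simp only [hv]

theorem search_eq_absent (key : String) (t : List String) (low high : Int)
    (h0 : 0 ≤ low) (h1 : high < (t.length : Int)) :
    search_word_in_wordlist key t low high
      = pv_absent (PySem.Str.lower key)
          (((t.map PySem.Str.lower).drop low.toNat).take (high + 1 - low).toNat) := by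
  fun_induction search_word_in_wordlist key t low high with
  | case1 low high h =>
      rw [pv_absent]
      simp [show (high + 1 - low).toNat = 0 from by omega]
  | case2 low high h hget =>
      exfalso
      have hm := PySem.Int.floordiv_two_mid_bounds (lo := low) (hi := high) (le_of_not_gt h)
      rw [PySem.List.pyGet?_of_nonneg t (show (0:Int) ≤ PySem.Int.floordiv (low + high) 2 from by omega)] at hget
      rw [List.getElem?_eq_none_iff] at hget
      omega
  | case3 low high h x hget heq =>
      have hle : low ≤ high := le_of_not_gt h
      have hm := PySem.Int.floordiv_two_mid_bounds (lo := low) (hi := high) hle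
      have hmid : (PySem.Int.floordiv (low + high) 2).toNat
          = low.toNat + (((high + 1 - low).toNat - 1) / 2 : Nat) := by
        have h2 : PySem.Int.floordiv (low + high) 2
            = low + ((((high + 1 - low).toNat - 1) / 2 : Nat) : Int) := by
          rw [PySem.Int.floordiv_eq_iff_of_pos (by omega)]; omega
        omega
      have hlen : (((t.map PySem.Str.lower).drop low.toNat).take (high + 1 - low).toNat).length
          = (high + 1 - low).toNat := by
        simp; omega
      rw [PySem.List.pyGet?_of_nonneg t (show (0:Int) ≤ PySem.Int.floordiv (low + high) 2 from by omega)] at hget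
      have hx? : (((t.map PySem.Str.lower).drop low.toNat).take (high + 1 - low).toNat)[
          ((((t.map PySem.Str.lower).drop low.toNat).take (high + 1 - low).toNat).length - 1) / 2]?
          = some (PySem.Str.lower x) := by
        rw [hlen, List.getElem?_take_of_lt (by omega), List.getElem?_drop, List.getElem?_map,
            ← hmid, hget]
        rfl
      rw [pv_absent_pos _ _ _ (by rw [hlen]; omega) hx?, if_pos heq]
  | case4 low high h x hget hne hlt ih =>
      have hle : low ≤ high := le_of_not_gt h
      have hm := PySem.Int.floordiv_two_mid_bounds (lo := low) (hi := high) hle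
      have hmid : (PySem.Int.floordiv (low + high) 2).toNat
          = low.toNat + (((high + 1 - low).toNat - 1) / 2 : Nat) := by
        have h2 : PySem.Int.floordiv (low + high) 2
            = low + ((((high + 1 - low).toNat - 1) / 2 : Nat) : Int) := by
          rw [PySem.Int.floordiv_eq_iff_of_pos (by omega)]; omega
        omega
      have hmid' : PySem.Int.floordiv (low + high) 2
          = low + ((((high + 1 - low).toNat - 1) / 2 : Nat) : Int) := by
        rw [PySem.Int.floordiv_eq_iff_of_pos (by omega)]; omega
      have hlen : (((t.map PySem.Str.lower).drop low.toNat).take (high + 1 - low).toNat).length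
          = (high + 1 - low).toNat := by
        simp; omega
      rw [PySem.List.pyGet?_of_nonneg t (show (0:Int) ≤ PySem.Int.floordiv (low + high) 2 from by omega)] at hget
      have hx? : (((t.map PySem.Str.lower).drop low.toNat).take (high + 1 - low).toNat)[
          ((((t.map PySem.Str.lower).drop low.toNat).take (high + 1 - low).toNat).length - 1) / 2]?
          = some (PySem.Str.lower x) := by
        rw [hlen, List.getElem?_take_of_lt (by omega), List.getElem?_drop, List.getElem?_map,
            ← hmid, hget]
        rfl
      rw [pv_absent_pos _ _ _ (by rw [hlen]; omega) hx?, if_neg hne, if_pos hlt,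
          ih (by omega) (by omega)]
      rw [hlen, List.take_take,
          show min (((high + 1 - low).toNat - 1) / 2) ((high + 1 - low).toNat)
              = ((high + 1 - low).toNat - 1) / 2 from by omega,
          show (PySem.Int.floordiv (low + high) 2 - 1 + 1 - low).toNat
              = ((high + 1 - low).toNat - 1) / 2 from by omega]
  | case5 low high h x hget hne hnlt ih =>
      have hle : low ≤ high := le_of_not_gt h
      have hm := PySem.Int.floordiv_two_mid_bounds (lo := low) (hi := high) hle
      have hmid : (PySem.Int.floordiv (low + high) 2).toNat
          = low.toNat + (((high + 1 - low).toNat - 1) / 2 : Nat) := by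
        have h2 : PySem.Int.floordiv (low + high) 2
            = low + ((((high + 1 - low).toNat - 1) / 2 : Nat) : Int) := by
          rw [PySem.Int.floordiv_eq_iff_of_pos (by omega)]; omega
        omega
      have hmid' : PySem.Int.floordiv (low + high) 2
          = low + ((((high + 1 - low).toNat - 1) / 2 : Nat) : Int) := by
        rw [PySem.Int.floordiv_eq_iff_of_pos (by omega)]; omega
      have hlen : (((t.map PySem.Str.lower).drop low.toNat).take (high + 1 - low).toNat).length
          = (high + 1 - low).toNat := by
        simp; omega
      rw [PySem.List.pyGet?_of_nonneg t (show (0:Int) ≤ PySem.Int.floordiv (low + high) 2 from by omega)] at hget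
      have hx? : (((t.map PySem.Str.lower).drop low.toNat).take (high + 1 - low).toNat)[
          ((((t.map PySem.Str.lower).drop low.toNat).take (high + 1 - low).toNat).length - 1) / 2]?
          = some (PySem.Str.lower x) := by
        rw [hlen, List.getElem?_take_of_lt (by omega), List.getElem?_drop, List.getElem?_map,
            ← hmid, hget]
        rfl
      rw [pv_absent_pos _ _ _ (by rw [hlen]; omega) hx?, if_neg hne, if_neg hnlt,
          ih (by omega) (by omega)]
      rw [hlen, List.drop_take, List.drop_drop,
          show (high + 1 - (PySem.Int.floordiv (low + high) 2 + 1)).toNat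
              = (high + 1 - low).toNat - (((high + 1 - low).toNat - 1) / 2 + 1) from by omega,
          show (PySem.Int.floordiv (low + high) 2 + 1).toNat
              = low.toNat + (((high + 1 - low).toNat - 1) / 2 + 1) from by omega]

-- ===== VERDICT (by name: the statement is the Claim_ definition above) =====
theorem new_words_spec : Claim_equal_new_words := by
  intro words wordlist _
  unfold Spec_new_words new_words new_words_alt check_incorrect_input
  match words, wordlist with
  | none, _ => rfl
  | some _, none => rfl
  | some ws, some wl =>
    simp only
    rw [PySem.List.foldl_append_if_eq_filter]
    simp only [List.nil_append, Bool.false_eq_true, if_false, Option.some.injEq]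
    apply List.filter_congr
    intro w _
    rw [search_eq_absent w wl 0 ((wl.length : Int) - 1) (by omega) (by omega)]
    simp [List.take_of_length_le]
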